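-- pv_equiv track=rewrite | github.com/sohampawar1866/MagicMoments_SKB-F1_SKB_P5 | backend/api/routes.py | _dominant_class
-- ===== SOURCE A (Python) =====
-- def _dominant_class(feats: list) -> str:
--     if not feats:
--         return "Unknown"
--     plastic = sum(1 for f in feats if f.get("properties", {}).get("type", "plastic") == "plastic")
--     if plastic == len(feats):
--         return "Marine Debris (Plastic)"
--     if plastic == 0:
--         return "Sargassum-suspect"
--     return "Mixed"
-- ===== SOURCE B (Python) =====
-- def _dominant_class(feats: list) -> str:
--     seen_plastic = False
--     seen_other = False
--     for f in feats:
--         if f.get("properties", {}).get("type", "plastic") == "plastic":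
--             seen_plastic = True
--         else:
--             seen_other = True
--         if seen_plastic and seen_other:
--             return "Mixed"
--     if seen_plastic:
--         return "Marine Debris (Plastic)"
--     if seen_other:
--         return "Sargassum-suspect"
--     return "Unknown"
-- ===== Notes on version B (the rewrite author's own statement) =====
-- stated objective: alternative
-- what changed: Replaces the integer tally plus length/zero comparisons with a single flag-based scan (seen_plastic/seen_other) that early-returns 'Mixed' as soon as both classes are seen.
import Mathlib
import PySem

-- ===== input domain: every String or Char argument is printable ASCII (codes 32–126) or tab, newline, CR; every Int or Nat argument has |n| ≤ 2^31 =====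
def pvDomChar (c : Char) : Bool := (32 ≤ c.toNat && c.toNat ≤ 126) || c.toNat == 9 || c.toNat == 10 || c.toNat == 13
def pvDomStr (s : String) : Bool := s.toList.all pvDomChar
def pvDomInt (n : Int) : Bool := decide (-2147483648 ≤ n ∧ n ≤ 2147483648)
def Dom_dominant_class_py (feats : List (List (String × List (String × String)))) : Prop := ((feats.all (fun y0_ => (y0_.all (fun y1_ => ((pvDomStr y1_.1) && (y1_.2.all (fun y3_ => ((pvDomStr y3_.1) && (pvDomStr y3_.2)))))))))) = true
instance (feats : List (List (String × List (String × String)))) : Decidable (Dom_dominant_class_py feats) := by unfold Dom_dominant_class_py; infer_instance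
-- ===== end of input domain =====

-- ===== PORT A =====
-- A and B read the same dict lookups: f.get("properties", {}).get("type", "plastic") == "plastic"
-- (assoc-list first-match lookup, exact for Python dicts under the type convention)
def pvGetD {a : Type} (d : List (String × a)) (k : String) (dflt : a) : a :=
  match d.find? (fun p => p.1 == k) with
  | some p => p.2
  | none => dflt

def pvIsPlastic (f : List (String × List (String × String))) : Bool :=
  pvGetD (pvGetD f "properties" []) "type" "plastic" == "plastic"

def dominant_class_py (feats : List (List (String × List (String × String)))) : String :=
  if feats = [] then "Unknown"
  else
    let plastic := feats.foldl (fun acc f => if pvIsPlastic f then acc + 1 else acc) 0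
    if plastic = feats.length then "Marine Debris (Plastic)"
    else if plastic = 0 then "Sargassum-suspect"
    else "Mixed"

-- ===== PORT B =====
-- B: one flag-based scan with an early return once both classes are seen
def pvScanLoop (feats : List (List (String × List (String × String)))) (sp so : Bool) : String :=
  match feats with
  | [] => if sp then "Marine Debris (Plastic)" else if so then "Sargassum-suspect" else "Unknown"
  | f :: rest =>
    let sp' := if pvIsPlastic f then true else sp
    let so' := if pvIsPlastic f then so else true
    if sp' && so' then "Mixed" else pvScanLoop rest sp' so'

def dominant_class_py_alt (feats : List (List (String × List (String × String)))) : String :=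
  pvScanLoop feats false false

-- ===== PRECONDITION & SPEC =====
def Spec_dominant_class_py (feats : List (List (String × List (String × String)))) (out : String) : Prop := out = dominant_class_py_alt feats
instance (feats : List (List (String × List (String × String)))) (out : String) : Decidable (Spec_dominant_class_py feats out) := by unfold Spec_dominant_class_py; infer_instance

-- ===== CLAIM (what is proved, stated in full; the proofs are below) =====
def Claim_equal_dominant_class_py : Prop := ∀ (feats : List (List (String × List (String × String)))), Dom_dominant_class_py feats → Spec_dominant_class_py feats (dominant_class_py feats)

-- ===== LEMMAS AND PROOFS =====
theorem pvFoldl_count (feats : List (List (String × List (String × String)))) (n : Nat) :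
    feats.foldl (fun acc f => if pvIsPlastic f then acc + 1 else acc) n
      = n + feats.countP pvIsPlastic := by
  induction feats generalizing n with
  | nil => simp
  | cons f rest ih =>
    simp only [List.foldl_cons, List.countP_cons, ih]
    by_cases h : pvIsPlastic f <;> simp [h] <;> omega

theorem pvScanLoop_tf (feats : List (List (String × List (String × String)))) :
    pvScanLoop feats true false
      = if feats.countP pvIsPlastic = feats.length then "Marine Debris (Plastic)" else "Mixed" := by
  induction feats with
  | nil => simp [pvScanLoop]
  | cons f rest ih =>
    by_cases h : pvIsPlastic f
    · simp [pvScanLoop, h, ih, List.countP_cons]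
    · have hle := List.countP_le_length (p := pvIsPlastic) (l := rest)
      simp only [pvScanLoop, h, if_false, if_true, Bool.and_true, List.countP_cons, List.length_cons]
      simp [h]
      omega

theorem pvScanLoop_ft (feats : List (List (String × List (String × String)))) :
    pvScanLoop feats false true
      = if feats.countP pvIsPlastic = 0 then "Sargassum-suspect" else "Mixed" := by
  induction feats with
  | nil => simp [pvScanLoop]
  | cons f rest ih =>
    by_cases h : pvIsPlastic f
    · simp [pvScanLoop, h, List.countP_cons]
    · simp [pvScanLoop, h, ih, List.countP_cons]

-- ===== VERDICT (by name: the statement is the Claim_ definition above) =====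
theorem dominant_class_py_spec : Claim_equal_dominant_class_py := by
  intro feats _
  unfold Spec_dominant_class_py dominant_class_py dominant_class_py_alt
  match feats with
  | [] => simp [pvScanLoop]
  | f :: rest =>
    simp only [if_neg (List.cons_ne_nil f rest)]
    rw [pvFoldl_count]
    by_cases h : pvIsPlastic f
    · rw [show pvScanLoop (f :: rest) false false = pvScanLoop rest true false by simp [pvScanLoop, h],
        pvScanLoop_tf]
      have hle := List.countP_le_length (p := pvIsPlastic) (l := rest)
      simp only [List.countP_cons, List.length_cons, h, if_true, Nat.zero_add]
      by_cases hc : rest.countP pvIsPlastic = rest.length <;> simp [hc] <;> omega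
    · rw [show pvScanLoop (f :: rest) false false = pvScanLoop rest false true by simp [pvScanLoop, h],
        pvScanLoop_ft]
      simp only [List.countP_cons, List.length_cons, h, if_false, Nat.zero_add]
      have hle := List.countP_le_length (p := pvIsPlastic) (l := rest)
      by_cases hc : rest.countP pvIsPlastic = 0 <;> simp [hc] <;> omega
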